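-- pv_equiv track=rewrite | github.com/compbiogroup/Transposition-and-Revesal-Distance-Considering-Intergenic-Regions-for-Unbalanced-Genomes | code/unweighted/r-t-rt-indel-intergenic.py | order_cycle
-- ===== SOURCE A (Python) =====
-- def get_rightmost_element(cycle, position) :
--     max_position = 0
--     for i in range(len(cycle)) :
--         if position[cycle[i]] > position[cycle[max_position]] :
--             max_position = i
--     return max_position
--
-- def order_cycle(cycle, position) :
--     index = get_rightmost_element(cycle, position)
--     new   = []
--     new.append(cycle[index])
--
--     if index % 2 == 0 :
--         iter_el  = (index-1) % len(cycle)
--         while iter_el != index :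
--             new.append(cycle[iter_el])
--             iter_el = (iter_el-1) % len(cycle)
--     else :
--         iter_el  = (index+1) % len(cycle)
--         while iter_el != index :
--             new.append(cycle[iter_el])
--             iter_el = (iter_el+1) % len(cycle)
--     return new
-- ===== SOURCE B (Python) =====
-- def order_cycle(cycle, position):
--     best = 0
--     for i, g in enumerate(cycle):
--         if position[g] > position[cycle[best]]:
--             best = i
--     if best % 2 == 0:
--         return list(reversed(cycle[best + 1:] + cycle[:best + 1]))
--     return cycle[best:] + cycle[:best]
-- ===== Notes on version B (the rewrite author's own statement) =====
-- stated objective: simpler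
-- what changed: B replaces A's two modular-arithmetic while-loops that append element by element with direct slice expressions (rotation for an odd index, reversed wraparound concatenation for an even index); the argmax scan is folded into a single enumerate loop.
import Mathlib
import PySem

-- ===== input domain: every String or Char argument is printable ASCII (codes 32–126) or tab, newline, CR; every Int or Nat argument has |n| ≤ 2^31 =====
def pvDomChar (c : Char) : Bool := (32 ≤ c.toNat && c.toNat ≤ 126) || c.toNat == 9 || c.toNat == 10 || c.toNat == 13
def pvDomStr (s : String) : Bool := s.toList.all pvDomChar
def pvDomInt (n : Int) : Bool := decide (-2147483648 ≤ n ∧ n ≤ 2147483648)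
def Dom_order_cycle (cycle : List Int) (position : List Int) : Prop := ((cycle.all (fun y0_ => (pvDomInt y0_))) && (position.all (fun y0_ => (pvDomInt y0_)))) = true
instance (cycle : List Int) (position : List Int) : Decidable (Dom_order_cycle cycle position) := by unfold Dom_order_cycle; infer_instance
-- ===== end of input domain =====

-- B replaces A's two modular while-loops by slice/reverse expressions (simpler decomposition, same cost).

-- ===== PORT A =====
def get_rightmost_element (cycle : List Int) (position : List Int) : Int :=
  (PySem.List.pyRange 0 (cycle.length : Int) 1).foldl
    (fun max_position i =>
      if PySem.List.pyGetD position (PySem.List.pyGetD cycle i 0) 0 >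
         PySem.List.pyGetD position (PySem.List.pyGetD cycle max_position 0) 0
      then i else max_position) 0

-- the two while-loops of A, fuel-bounded (fuel only makes the loop total; inside Pre_ it never runs out)
def ocLoopDown (cycle : List Int) (index : Int) : Nat → Int → List Int → List Int
  | fuel, iter_el, new =>
    if iter_el = index then new
    else match fuel with
      | 0 => new
      | f + 1 => ocLoopDown cycle index f (PySem.Int.mod (iter_el - 1) (cycle.length : Int))
                   (new ++ [PySem.List.pyGetD cycle iter_el 0])

def ocLoopUp (cycle : List Int) (index : Int) : Nat → Int → List Int → List Int
  | fuel, iter_el, new =>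
    if iter_el = index then new
    else match fuel with
      | 0 => new
      | f + 1 => ocLoopUp cycle index f (PySem.Int.mod (iter_el + 1) (cycle.length : Int))
                   (new ++ [PySem.List.pyGetD cycle iter_el 0])

def order_cycle (cycle : List Int) (position : List Int) : List Int :=
  let index := get_rightmost_element cycle position
  let new := [PySem.List.pyGetD cycle index 0]
  if PySem.Int.mod index 2 = 0 then
    ocLoopDown cycle index cycle.length (PySem.Int.mod (index - 1) (cycle.length : Int)) new
  else
    ocLoopUp cycle index cycle.length (PySem.Int.mod (index + 1) (cycle.length : Int)) new

-- ===== PORT B =====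
def order_cycle_alt (cycle : List Int) (position : List Int) : List Int :=
  let best := (PySem.List.enumerate cycle 0).foldl
    (fun best p =>
      if PySem.List.pyGetD position p.2 0 >
         PySem.List.pyGetD position (PySem.List.pyGetD cycle best 0) 0
      then p.1 else best) 0
  if PySem.Int.mod best 2 = 0 then
    (PySem.List.slice cycle (some (best + 1)) none ++ PySem.List.slice cycle none (some (best + 1))).reverse
  else
    PySem.List.slice cycle (some best) none ++ PySem.List.slice cycle none (some best)

-- ===== PRECONDITION & SPEC =====
-- Pre_ excludes exactly the inputs where Python A raises: an empty cycle (cycle[0] → IndexError)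
-- and cycle elements that are not valid Python indices into position (IndexError).
def Pre_order_cycle (cycle : List Int) (position : List Int) : Prop :=
  cycle ≠ [] ∧ ∀ v ∈ cycle, PySem.Raise.InRange position.length v
instance (cycle : List Int) (position : List Int) : Decidable (Pre_order_cycle cycle position) := by
  unfold Pre_order_cycle; infer_instance

def pvWitness_order_cycle : List Int × List Int := ([0, 1], [5, 3])

def Spec_order_cycle (cycle : List Int) (position : List Int) (out : List Int) : Prop := out = order_cycle_alt cycle position
instance (cycle : List Int) (position : List Int) (out : List Int) : Decidable (Spec_order_cycle cycle position out) := by unfold Spec_order_cycle; infer_instance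

-- ===== CLAIM (what is proved, stated in full; the proofs are below) =====
def Claim_equal_order_cycle : Prop := ∀ (cycle : List Int) (position : List Int), Dom_order_cycle cycle position → Pre_order_cycle cycle position → Spec_order_cycle cycle position (order_cycle cycle position)


-- ===== LEMMAS AND PROOFS =====

-- generic: a fold that at each step keeps the accumulator or picks the element lands in acc :: l
theorem foldl_pick_mem (f : Int → Int → Int) (h : ∀ b i, f b i = b ∨ f b i = i) :
    ∀ (l : List Int) (a : Int), l.foldl f a ∈ a :: l := by
  intro l
  induction l with
  | nil => intro a; simp
  | cons i l ih =>
    intro a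
    simp only [List.foldl_cons]
    rcases h a i with hb | hi
    · rw [hb]
      rcases List.mem_cons.mp (ih a) with h1 | h1 <;> simp [h1]
    · rw [hi]
      rcases List.mem_cons.mp (ih i) with h1 | h1 <;> simp [h1]

-- A's fold over range(len(cycle)) equals B's fold over enumerate(cycle)
theorem argmax_eq (cycle position : List Int) :
    ∀ (d s : Nat) (acc : Int), s + d = cycle.length →
    (PySem.List.enumerate (cycle.drop s) (s : Int)).foldl
      (fun best p =>
        if PySem.List.pyGetD position p.2 0 >
           PySem.List.pyGetD position (PySem.List.pyGetD cycle best 0) 0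
        then p.1 else best) acc
    = (PySem.List.pyRange (s : Int) (cycle.length : Int) 1).foldl
      (fun max_position i =>
        if PySem.List.pyGetD position (PySem.List.pyGetD cycle i 0) 0 >
           PySem.List.pyGetD position (PySem.List.pyGetD cycle max_position 0) 0
        then i else max_position) acc := by
  intro d
  induction d with
  | zero =>
    intro s acc hs
    rw [List.drop_eq_nil_of_le (by omega), PySem.List.pyRange_one_eq_nil (by exact_mod_cast (by omega : cycle.length ≤ s))]
    simp [PySem.List.enumerate]
  | succ d ih =>
    intro s acc hs
    have hslt : s < cycle.length := by omega
    rw [List.drop_eq_getElem_cons hslt, PySem.List.enumerate_cons,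
        PySem.List.pyRange_one_cons (by exact_mod_cast hslt)]
    simp only [List.foldl_cons]
    have hgs : PySem.List.pyGetD cycle (s : Int) 0 = cycle[s] := by
      rw [PySem.List.pyGetD_natCast, List.getD_eq_getElem _ _ hslt]
    rw [hgs]
    have := ih (s + 1) (if PySem.List.pyGetD position cycle[s] 0 >
           PySem.List.pyGetD position (PySem.List.pyGetD cycle acc 0) 0
        then (s : Int) else acc) (by omega)
    push_cast at this ⊢
    exact this

-- modular index steps, in Nat form
theorem mod_step_down (n j : Nat) (hj : j < n) :
    PySem.Int.mod ((j : Int) - 1) (n : Int) = (((if j = 0 then n - 1 else j - 1) : Nat) : Int) := by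
  rw [PySem.Int.mod_eq_emod_of_pos (by exact_mod_cast (by omega : 0 < n))]
  split_ifs with h0
  · subst h0
    rw [show ((0 : Nat) : Int) - 1 = ((n - 1 : Nat) : Int) + (n : Int) * (-1) by push_cast [Nat.one_le_iff_ne_zero]; omega]
    rw [Int.add_mul_emod_self_left]
    exact Int.emod_eq_of_lt (by positivity) (by omega)
  · rw [show ((j : Int) - 1) = ((j - 1 : Nat) : Int) by omega]
    exact Int.emod_eq_of_lt (by positivity) (by omega)

theorem mod_step_up (n j : Nat) (hj : j < n) :
    PySem.Int.mod ((j : Int) + 1) (n : Int) = (((if j + 1 = n then 0 else j + 1) : Nat) : Int) := by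
  rw [PySem.Int.mod_eq_emod_of_pos (by exact_mod_cast (by omega : 0 < n))]
  split_ifs with h0
  · rw [show ((j : Int) + 1) = (n : Int) by exact_mod_cast congrArg Nat.cast h0]
    simp
  · rw [show ((j : Int) + 1) = ((j + 1 : Nat) : Int) by push_cast; ring]
    exact Int.emod_eq_of_lt (by positivity) (by omega)

-- the cyclic segments the two while-loops of A produce
def segUp (xs : List Int) (i j : Nat) : List Int :=
  if i ≤ j then (xs.drop i).take (j - i) else xs.drop i ++ xs.take j

def segDown (xs : List Int) (i j : Nat) : List Int :=
  if j ≤ i then ((xs.take (i + 1)).drop (j + 1)).reverse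
  else (xs.take (i + 1)).reverse ++ (xs.drop (j + 1)).reverse

theorem take_succ_getElem (xs : List Int) (i : Nat) (hi : i < xs.length) :
    xs.take (i + 1) = xs.take i ++ [xs[i]] := by
  rw [List.take_succ, List.getElem?_eq_getElem hi]
  rfl

theorem segUp_step (xs : List Int) (i j : Nat) (hi : i < xs.length) (hj : j < xs.length)
    (hij : i ≠ j) :
    segUp xs i j = xs[i] :: segUp xs (if i + 1 = xs.length then 0 else i + 1) j := by
  have hdrop := List.drop_eq_getElem_cons hi
  rcases Nat.lt_or_ge i j with hlt | hge
  · rw [if_neg (show ¬ i + 1 = xs.length by omega)]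
    unfold segUp
    rw [if_pos (show i ≤ j by omega), if_pos (show i + 1 ≤ j by omega), hdrop,
        show j - i = (j - (i + 1)) + 1 by omega, List.take_succ_cons]
  · have hgt : j < i := by omega
    by_cases hend : i + 1 = xs.length
    · rw [if_pos hend]
      unfold segUp
      rw [if_neg (show ¬ i ≤ j by omega), if_pos (Nat.zero_le j), hdrop, hend,
          List.drop_length]
      simp
    · rw [if_neg hend]
      unfold segUp
      rw [if_neg (show ¬ i ≤ j by omega), if_neg (show ¬ i + 1 ≤ j by omega), hdrop]
      rfl

theorem segDown_step (xs : List Int) (i j : Nat) (hi : i < xs.length) (hj : j < xs.length)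
    (hij : i ≠ j) :
    segDown xs i j = xs[i] :: segDown xs (if i = 0 then xs.length - 1 else i - 1) j := by
  rcases Nat.lt_or_ge j i with hgt | hge
  · rw [if_neg (show ¬ i = 0 by omega)]
    unfold segDown
    rw [if_pos (show j ≤ i by omega), if_pos (show j ≤ i - 1 by omega),
        take_succ_getElem xs i hi,
        List.drop_append_of_le_length (by rw [List.length_take]; omega),
        List.reverse_append, show i - 1 + 1 = i by omega]
    simp
  · have hlt : i < j := by omega
    by_cases h0 : i = 0
    · subst h0
      rw [if_pos rfl]
      unfold segDown
      rw [if_neg (show ¬ j ≤ 0 by omega), if_pos (show j ≤ xs.length - 1 by omega),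
          show xs.length - 1 + 1 = xs.length by omega, List.take_length,
          take_succ_getElem xs 0 hi]
      simp
    · rw [if_neg h0]
      unfold segDown
      rw [if_neg (show ¬ j ≤ i by omega), if_neg (show ¬ j ≤ i - 1 by omega),
          take_succ_getElem xs i hi, List.reverse_append, show i - 1 + 1 = i by omega]
      rfl

theorem ocLoopUp_eq (xs : List Int) (j : Nat) (hj : j < xs.length) :
    ∀ (fuel i : Nat) (acc : List Int), i < xs.length →
    (if i ≤ j then j - i else xs.length + j - i) ≤ fuel →
    ocLoopUp xs (j : Int) fuel (i : Int) acc = acc ++ segUp xs i j := by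
  intro fuel
  induction fuel with
  | zero =>
    intro i acc hi hd
    have hij : i = j := by split_ifs at hd <;> omega
    subst hij
    rw [ocLoopUp]
    simp [segUp]
  | succ f ih =>
    intro i acc hi hd
    by_cases hij : i = j
    · subst hij
      rw [ocLoopUp]
      simp [segUp]
    · have hg : PySem.List.pyGetD xs (i : Int) 0 = xs[i] := by
        rw [PySem.List.pyGetD_natCast, List.getD_eq_getElem _ _ hi]
      rw [ocLoopUp, if_neg (show ¬ (i : Int) = (j : Int) by exact_mod_cast hij)]
      rw [mod_step_up xs.length i hi, hg,
          ih (if i + 1 = xs.length then 0 else i + 1) (acc ++ [xs[i]])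
            (by split_ifs <;> omega) (by split_ifs at hd ⊢ <;> omega),
          segUp_step xs i j hi hj hij]
      simp

theorem ocLoopDown_eq (xs : List Int) (j : Nat) (hj : j < xs.length) :
    ∀ (fuel i : Nat) (acc : List Int), i < xs.length →
    (if j ≤ i then i - j else i + xs.length - j) ≤ fuel →
    ocLoopDown xs (j : Int) fuel (i : Int) acc = acc ++ segDown xs i j := by
  intro fuel
  induction fuel with
  | zero =>
    intro i acc hi hd
    have hij : i = j := by split_ifs at hd <;> omega
    subst hij
    rw [ocLoopDown]
    simp [segDown]
  | succ f ih =>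
    intro i acc hi hd
    by_cases hij : i = j
    · subst hij
      rw [ocLoopDown]
      simp [segDown]
    · have hg : PySem.List.pyGetD xs (i : Int) 0 = xs[i] := by
        rw [PySem.List.pyGetD_natCast, List.getD_eq_getElem _ _ hi]
      rw [ocLoopDown, if_neg (show ¬ (i : Int) = (j : Int) by exact_mod_cast hij)]
      rw [mod_step_down xs.length i hi, hg,
          ih (if i = 0 then xs.length - 1 else i - 1) (acc ++ [xs[i]])
            (by split_ifs <;> omega) (by split_ifs at hd ⊢ <;> omega),
          segDown_step xs i j hi hj hij]
      simp

-- ===== VERDICT (by name: the statement is the Claim_ definition above) =====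
theorem order_cycle_spec : Claim_equal_order_cycle := by
  intro cycle position _ hpre
  obtain ⟨hne, -⟩ := hpre
  have hn : 0 < cycle.length := List.length_pos_iff.mpr hne
  unfold Spec_order_cycle order_cycle order_cycle_alt
  have hbest :
      (PySem.List.enumerate cycle 0).foldl
        (fun best p =>
          if PySem.List.pyGetD position p.2 0 >
             PySem.List.pyGetD position (PySem.List.pyGetD cycle best 0) 0
          then p.1 else best) 0
        = get_rightmost_element cycle position := by
    unfold get_rightmost_element
    have h := argmax_eq cycle position cycle.length 0 0 (by omega)
    simpa using h
  rw [hbest]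
  obtain ⟨j, hjlt, hI⟩ :
      ∃ j : Nat, j < cycle.length ∧ get_rightmost_element cycle position = (j : Int) := by
    have hmem : get_rightmost_element cycle position ∈
        (0 : Int) :: PySem.List.pyRange 0 (cycle.length : Int) 1 := by
      unfold get_rightmost_element
      exact foldl_pick_mem _ (by intro b i; split_ifs <;> simp) _ 0
    rcases List.mem_cons.mp hmem with h0 | hm
    · exact ⟨0, hn, by simpa using h0⟩
    · have hb := (PySem.List.mem_pyRange_one).mp hm
      refine ⟨(get_rightmost_element cycle position).toNat, ?_, ?_⟩
      · have := hb.2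
        omega
      · have := hb.1
        omega
  rw [hI]
  have hg : PySem.List.pyGetD cycle ((j : Nat) : Int) 0 = cycle[j] := by
    rw [PySem.List.pyGetD_natCast, List.getD_eq_getElem _ _ hjlt]
  have hfrom : PySem.List.slice cycle (some ((j : Int))) none = cycle.drop j :=
    PySem.List.slice_from_natCast cycle j
  have hfrom1 : PySem.List.slice cycle (some ((j : Int) + 1)) none = cycle.drop (j + 1) := by
    rw [show ((j : Int) + 1) = (((j + 1 : Nat)) : Int) by push_cast; ring]
    exact PySem.List.slice_from_natCast cycle (j + 1)
  have hto : PySem.List.slice cycle none (some ((j : Int))) = cycle.take j :=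
    PySem.List.slice_to_natCast cycle j
  have hto1 : PySem.List.slice cycle none (some ((j : Int) + 1)) = cycle.take (j + 1) := by
    rw [show ((j : Int) + 1) = (((j + 1 : Nat)) : Int) by push_cast; ring]
    exact PySem.List.slice_to_natCast cycle (j + 1)
  by_cases hpar : PySem.Int.mod ((j : Nat) : Int) 2 = 0
  · rw [if_pos hpar, if_pos hpar, hg, mod_step_down cycle.length j hjlt,
        ocLoopDown_eq cycle j hjlt cycle.length _ _ (by split_ifs <;> omega)
          (by split_ifs <;> omega),
        hfrom1, hto1, List.reverse_append, take_succ_getElem cycle j hjlt,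
        List.reverse_append]
    by_cases h0 : j = 0
    · subst h0
      rw [if_pos rfl]
      unfold segDown
      rw [if_pos (by omega : (0 : Nat) ≤ cycle.length - 1),
          show cycle.length - 1 + 1 = cycle.length by omega, List.take_length]
      simp
    · rw [if_neg h0]
      unfold segDown
      rw [if_neg (show ¬ j ≤ j - 1 by omega), show j - 1 + 1 = j by omega]
      simp
  · rw [if_neg hpar, if_neg hpar, hg, mod_step_up cycle.length j hjlt,
        ocLoopUp_eq cycle j hjlt cycle.length _ _ (by split_ifs <;> omega)
          (by split_ifs <;> omega),
        hfrom, hto]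
    by_cases hend : j + 1 = cycle.length
    · rw [if_pos hend]
      unfold segUp
      rw [if_pos (Nat.zero_le j), List.drop_eq_getElem_cons hjlt, hend, List.drop_length]
      simp
    · rw [if_neg hend]
      unfold segUp
      rw [if_neg (show ¬ j + 1 ≤ j by omega), List.drop_eq_getElem_cons hjlt]
      simp only [List.cons_append, List.nil_append]
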